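-- pv_equiv track=rewrite | github.com/cody-s-lee/advent2024 | day09.py | dicts2filesystem
-- ===== SOURCE A (Python) =====
-- def dicts2filesystem(files: dict[int, tuple[int, int]], empties: dict[int, int]):
--     # find len of the filesystem by finding the max index+size of files and empties
--     filesystem_len = 0
--     for idx, size in files.values():
--         filesystem_len = max(filesystem_len, idx + size)
--     for idx, size in empties.items():
--         filesystem_len = max(filesystem_len, idx + size)
--
--     filesystem = [-1] * filesystem_len
--
--     for filename, (idx, size) in files.items():
--         for i in range(size):
--             filesystem[idx + i] = filename
--
--     return filesystem
-- ===== SOURCE B (Python) =====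
-- def dicts2filesystem(files: dict[int, tuple[int, int]], empties: dict[int, int]):
--     filesystem_len = 0
--     for idx, size in files.values():
--         filesystem_len = max(filesystem_len, idx + size)
--     for idx, size in empties.items():
--         filesystem_len = max(filesystem_len, idx + size)
--
--     # Write-free, per-cell resolution: each position asks — scanning the files
--     # from last-inserted to first — which file covers it; the last-inserted
--     # covering file wins, which is exactly A's overwrite order.
--     items = list(files.items())[::-1]
--     return [next((name for name, (idx, size) in items if idx <= i < idx + size), -1)
--             for i in range(filesystem_len)]
-- ===== Notes on version B (the rewrite author's own statement) =====
-- stated objective: alternative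
-- what changed: B never writes into an array at all: instead of A's preallocate-and-mutate fill it resolves each output cell independently by scanning the file list from last-inserted to first and taking the first file whose interval covers that position (last-inserted wins = A's overwrite order), emitting the result as one comprehension.
-- outside the precondition, e.g. on dicts2filesystem({5: (-1, 1)}, {0: 2}): A returns [-1, 5], B returns [-1, -1]; on dicts2filesystem({5: (-5, 1)}, {0: 2}): A raises IndexError, B returns [-1, -1]
import Mathlib
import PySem

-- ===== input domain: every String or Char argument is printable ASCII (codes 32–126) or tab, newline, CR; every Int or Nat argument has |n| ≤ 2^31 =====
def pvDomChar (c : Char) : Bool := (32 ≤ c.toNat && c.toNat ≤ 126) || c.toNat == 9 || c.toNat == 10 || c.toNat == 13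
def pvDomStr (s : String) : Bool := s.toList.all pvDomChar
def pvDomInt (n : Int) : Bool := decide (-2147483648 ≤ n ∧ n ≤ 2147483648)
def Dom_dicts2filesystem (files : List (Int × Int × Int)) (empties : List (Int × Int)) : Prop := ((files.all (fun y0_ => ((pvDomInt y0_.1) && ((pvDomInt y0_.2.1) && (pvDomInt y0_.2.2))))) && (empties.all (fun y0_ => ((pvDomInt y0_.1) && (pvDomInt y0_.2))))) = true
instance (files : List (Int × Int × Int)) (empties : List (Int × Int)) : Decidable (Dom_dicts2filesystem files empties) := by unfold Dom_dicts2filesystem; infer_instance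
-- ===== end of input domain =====

-- B resolves each cell by a reverse scan over the file list (first covering file from the end wins) instead of A's mutate-a-preallocated-list fill; return-value equivalence only.


-- ===== PORT A =====
def dicts2filesystem (files : List (Int × Int × Int)) (empties : List (Int × Int)) : List Int :=
  let len1 := files.foldl (fun m e => max m (e.2.1 + e.2.2)) 0
  let len2 := empties.foldl (fun m e => max m (e.1 + e.2)) len1
  let filesystem := List.replicate len2.toNat (-1 : Int)
  files.foldl (fun fs e =>
    (PySem.List.pyRange 0 e.2.2 1).foldl (fun fs i =>
      PySem.List.pySetD fs (e.2.1 + i) e.1) fs) filesystem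

-- ===== PORT B =====
def dicts2filesystem_alt (files : List (Int × Int × Int)) (empties : List (Int × Int)) : List Int :=
  let len1 := files.foldl (fun m e => max m (e.2.1 + e.2.2)) 0
  let len2 := empties.foldl (fun m e => max m (e.1 + e.2)) len1
  let items := files.reverse
  (PySem.List.pyRange 0 len2 1).map (fun i =>
    match items.find? (fun e => decide (e.2.1 ≤ i ∧ i < e.2.1 + e.2.2)) with
    | some e => e.1
    | none => (-1 : Int))

-- ===== PRECONDITION & SPEC =====
-- Pre_ excludes files that start at a negative index (with positive size): there A's write
-- filesystem[idx+i] either raises IndexError or stores the file near the END of the array by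
-- Python's negative-index wraparound — an artefact of the mutable-list fill; B leaves such cells empty.
def Pre_dicts2filesystem (files : List (Int × Int × Int)) (empties : List (Int × Int)) : Prop :=
  ∀ e ∈ files, 1 ≤ e.2.2 → 0 ≤ e.2.1
instance (files : List (Int × Int × Int)) (empties : List (Int × Int)) : Decidable (Pre_dicts2filesystem files empties) := by unfold Pre_dicts2filesystem; infer_instance
def pvWitness_dicts2filesystem : (List (Int × Int × Int)) × (List (Int × Int)) :=
  ([(1, 0, 2), (2, 1, 3)], [(7, 2)])
def Spec_dicts2filesystem (files : List (Int × Int × Int)) (empties : List (Int × Int)) (out : List Int) : Prop := out = dicts2filesystem_alt files empties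
instance (files : List (Int × Int × Int)) (empties : List (Int × Int)) (out : List Int) : Decidable (Spec_dicts2filesystem files empties out) := by unfold Spec_dicts2filesystem; infer_instance

-- ===== CLAIM (what is proved, stated in full; the proofs are below) =====
def Claim_equal_dicts2filesystem : Prop := ∀ (files : List (Int × Int × Int)) (empties : List (Int × Int)), Dom_dicts2filesystem files empties → Pre_dicts2filesystem files empties → Spec_dicts2filesystem files empties (dicts2filesystem files empties)

-- ===== LEMMAS AND PROOFS =====

-- A's inner fill of one file: cell k becomes `name` iff idx ≤ k < idx + s.
lemma inner_fill (L : Nat) (name idx : Int) (hidx : 0 ≤ idx) (s : Nat)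
    (fs : List Int)
    (hub : idx + (s : Int) ≤ (L : Int)) (hlen : fs.length = L) :
    ((PySem.List.pyRange 0 (s : Int) 1).foldl (fun fs i => PySem.List.pySetD fs (idx + i) name) fs).length = L ∧
    ∀ k : Nat, k < L →
      ((PySem.List.pyRange 0 (s : Int) 1).foldl (fun fs i => PySem.List.pySetD fs (idx + i) name) fs).getD k 0
      = if idx ≤ (k : Int) ∧ (k : Int) < idx + (s : Int) then name else fs.getD k 0 := by
  induction s with
  | zero =>
    refine ⟨by simpa [PySem.List.pyRange_one] using hlen, ?_⟩
    intro k hk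
    simp
  | succ s ih =>
    have hub' : idx + (s : Int) ≤ (L : Int) := by push_cast at hub ⊢; omega
    obtain ⟨ih1, ih2⟩ := ih hub'
    have hcast : ((s + 1 : Nat) : Int) = (s : Int) + 1 := by push_cast; ring
    rw [hcast, PySem.List.pyRange_one_succ_right (by positivity), List.foldl_append]
    simp only [List.foldl_cons, List.foldl_nil]
    have hpos : 0 ≤ idx + (s : Int) := by positivity
    rw [PySem.List.pySetD_of_nonneg _ _ hpos]
    constructor
    · simp [ih1]
    · intro k hk
      have hkl : k < ((PySem.List.pyRange 0 (s:Int) 1).foldl (fun fs i => PySem.List.pySetD fs (idx + i) name) fs).length := by omega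
      rw [List.getD_eq_getElem _ _ (by simp [ih1]; omega), List.getElem_set]
      have htn : ((idx + (s:Int)).toNat : Int) = idx + (s : Int) := Int.toNat_of_nonneg hpos
      by_cases hke : (k : Int) = idx + (s : Int)
      · have h1 : (idx + (s:Int)).toNat = k := by omega
        have h2 : idx ≤ (k : Int) ∧ (k : Int) < idx + ((s : Int) + 1) := by omega
        simp [h1, h2]
      · have h1 : ¬ (idx + (s:Int)).toNat = k := by omega
        simp only [h1, if_false]
        rw [← List.getD_eq_getElem _ 0 hkl, ih2 k hk]
        have h2 : (idx ≤ (k : Int) ∧ (k : Int) < idx + ((s : Int) + 1)) ↔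
                  (idx ≤ (k : Int) ∧ (k : Int) < idx + (s : Int)) := by omega
        simp [h2]

-- One file's fill, stated through B's covering test (also for size ≤ 0, where the fill is empty).
lemma fill_one (L : Nat) (e : Int × Int × Int) (fs : List Int)
    (hpre : 1 ≤ e.2.2 → 0 ≤ e.2.1) (hub : e.2.1 + e.2.2 ≤ (L : Int)) (hlen : fs.length = L) :
    ((PySem.List.pyRange 0 e.2.2 1).foldl (fun fs i => PySem.List.pySetD fs (e.2.1 + i) e.1) fs).length = L ∧
    ∀ k : Nat, k < L →
      ((PySem.List.pyRange 0 e.2.2 1).foldl (fun fs i => PySem.List.pySetD fs (e.2.1 + i) e.1) fs).getD k 0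
      = if e.2.1 ≤ (k : Int) ∧ (k : Int) < e.2.1 + e.2.2 then e.1 else fs.getD k 0 := by
  by_cases hs : 1 ≤ e.2.2
  · have hidx := hpre hs
    have hsz : e.2.2 = ((e.2.2.toNat : Nat) : Int) := (Int.toNat_of_nonneg (by omega)).symm
    rw [hsz]
    exact inner_fill L e.1 e.2.1 hidx e.2.2.toNat fs (by rw [← hsz]; exact hub) hlen
  · have hr : PySem.List.pyRange 0 e.2.2 1 = [] := by
      rw [PySem.List.pyRange_one]
      simp only [List.map_eq_nil_iff, List.range_eq_nil, Int.toNat_eq_zero]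
      omega
    rw [hr]
    refine ⟨hlen, ?_⟩
    intro k hk
    have : ¬ (e.2.1 ≤ (k : Int) ∧ (k : Int) < e.2.1 + e.2.2) := by omega
    simp [this]

-- A's whole fill: cell k is the id of the LAST file covering k (= the first one in the reversed list), else the initial content.
lemma outer_fill (L : Nat) :
    ∀ (fl : List (Int × Int × Int)) (fs : List Int),
    (∀ e ∈ fl, 1 ≤ e.2.2 → 0 ≤ e.2.1) →
    (∀ e ∈ fl, e.2.1 + e.2.2 ≤ (L : Int)) →
    fs.length = L →
    (fl.foldl (fun fs e => (PySem.List.pyRange 0 e.2.2 1).foldl (fun fs i => PySem.List.pySetD fs (e.2.1 + i) e.1) fs) fs).length = L ∧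
    ∀ k : Nat, k < L →
      (fl.foldl (fun fs e => (PySem.List.pyRange 0 e.2.2 1).foldl (fun fs i => PySem.List.pySetD fs (e.2.1 + i) e.1) fs) fs).getD k 0
      = match fl.reverse.find? (fun e => decide (e.2.1 ≤ (k : Int) ∧ (k : Int) < e.2.1 + e.2.2)) with
        | some e => e.1
        | none => fs.getD k 0 := by
  intro fl
  induction fl with
  | nil => intro fs _ _ hlen; exact ⟨hlen, fun k hk => by simp⟩
  | cons e tl ih =>
    intro fs hpre hub hlen
    simp only [List.foldl_cons]
    obtain ⟨f1, f2⟩ := fill_one L e fs (hpre e (List.mem_cons_self ..))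
      (hub e (List.mem_cons_self ..)) hlen
    obtain ⟨o1, o2⟩ := ih _ (fun x hx => hpre x (List.mem_cons_of_mem _ hx))
      (fun x hx => hub x (List.mem_cons_of_mem _ hx)) f1
    refine ⟨o1, ?_⟩
    intro k hk
    rw [o2 k hk, List.reverse_cons, List.find?_append]
    cases hfind : tl.reverse.find? (fun e => decide (e.2.1 ≤ (k : Int) ∧ (k : Int) < e.2.1 + e.2.2)) with
    | some x => simp
    | none =>
      simp only [List.find?_singleton]
      rw [f2 k hk]
      by_cases hc : e.2.1 ≤ (k : Int) ∧ (k : Int) < e.2.1 + e.2.2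
      · simp [hc]
      · simp [hc]

-- ===== VERDICT (by name: the statement is the Claim_ definition above) =====
theorem dicts2filesystem_spec : Claim_equal_dicts2filesystem := by
  intro files empties _ hpre
  unfold Spec_dicts2filesystem
  revert hpre
  show (∀ e ∈ files, 1 ≤ e.2.2 → 0 ≤ e.2.1) → _
  intro hpre
  unfold dicts2filesystem dicts2filesystem_alt
  simp only []
  set len1 := files.foldl (fun m e => max m (e.2.1 + e.2.2)) 0 with hl1
  set len2 := empties.foldl (fun m e => max m (e.1 + e.2)) len1 with hl2
  have h01 : (0:Int) ≤ len1 := (PySem.List.le_foldl_max_int files (fun e => e.2.1 + e.2.2) 0).1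
  have h12 : len1 ≤ len2 := (PySem.List.le_foldl_max_int empties (fun e => e.1 + e.2) len1).1
  have h0 : (0:Int) ≤ len2 := le_trans h01 h12
  have hL : ((len2.toNat : Nat) : Int) = len2 := Int.toNat_of_nonneg h0
  have hub : ∀ e ∈ files, e.2.1 + e.2.2 ≤ ((len2.toNat : Nat) : Int) := by
    intro e he
    rw [hL]
    exact le_trans ((PySem.List.le_foldl_max_int files (fun e => e.2.1 + e.2.2) 0).2 e he) h12
  obtain ⟨h1, h2⟩ := outer_fill len2.toNat files (List.replicate len2.toNat (-1))
    hpre hub (by simp)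
  apply List.ext_getElem
  · rw [h1]; simp [PySem.List.length_pyRange_one]
  · intro k hk1 hk2
    have hkL : k < len2.toNat := by rwa [h1] at hk1
    rw [List.getElem_map, PySem.List.getElem_pyRange_one]
    simp only [zero_add]
    rw [← List.getD_eq_getElem _ 0 hk1]
    simp only [Bool.decide_and] at h2 ⊢
    rw [h2 k hkL]
    cases hfind : files.reverse.find? (fun e => decide (e.2.1 ≤ (k : Int)) && decide ((k : Int) < e.2.1 + e.2.2)) with
    | some x => simp
    | none => simp [List.getD, hkL]
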